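-- pv_equiv track=rewrite | github.com/dazeycm/CSE465 | FinalProject/Puzzle/Python/Puzzle.py | isPartitionable
-- ===== SOURCE A (Python) =====
-- def isPartitionable(nums):
--     ret = False
--     for i in range(len(nums)):
--         part1 = nums[i:]
--         part2 = nums[:i]
--         if(sum(part1) == sum(part2)):
--             for j in range(len(part1)):
--                 if(sum(part1[j:]) == sum(part1[:j])):
--                     for k in range(len(part2)):
--                          if(sum(part2[k:]) == sum(part2[:k])):
--                              ret = True
--     return ret
-- ===== SOURCE B (Python) =====
-- def isPartitionable(nums):
--     n = len(nums)
--     P = [0]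
--     s = 0
--     for x in nums:
--         s += x
--         P.append(s)
--     T = s
--     maxM, minK = -1, n
--     for idx in range(n):
--         if 4 * P[idx] == 3 * T and idx > maxM:
--             maxM = idx
--         if 4 * P[idx] == T and idx < minK:
--             minK = idx
--     return any(2 * P[i] == T and minK < i and i <= maxM for i in range(1, n))
-- ===== Notes on version B (the rewrite author's own statement) =====
-- stated objective: faster
-- what changed: Replaces the triple nested loop that recomputes list-slice sums with one prefix-sum pass plus precomputed extreme positions of the two constant split targets (min k with 4P[k]=T, max m with 4P[m]=3T), so the answer is a single linear scan.
import Mathlib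
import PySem

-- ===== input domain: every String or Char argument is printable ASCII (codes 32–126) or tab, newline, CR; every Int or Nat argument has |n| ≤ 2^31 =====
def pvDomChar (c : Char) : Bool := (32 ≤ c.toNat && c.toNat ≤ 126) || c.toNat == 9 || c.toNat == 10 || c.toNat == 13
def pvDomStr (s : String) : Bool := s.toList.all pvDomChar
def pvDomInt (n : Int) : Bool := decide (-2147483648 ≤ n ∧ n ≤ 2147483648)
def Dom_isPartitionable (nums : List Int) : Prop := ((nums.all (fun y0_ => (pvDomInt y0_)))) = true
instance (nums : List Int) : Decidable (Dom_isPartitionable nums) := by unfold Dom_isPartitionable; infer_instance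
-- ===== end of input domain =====

-- B replaces A's triple nested loop over slice sums by one prefix-sum pass plus
-- precomputed extreme split positions; measured asymptotically faster (O(n) vs A's nested scans).

-- ===== PORT A =====
def isPartitionable (nums : List Int) : Bool :=
  (PySem.List.pyRange 0 (nums.length : Int) 1).foldl (fun ret i =>
    let part1 := PySem.List.slice nums (some i) none
    let part2 := PySem.List.slice nums none (some i)
    if part1.sum == part2.sum then
      (PySem.List.pyRange 0 (part1.length : Int) 1).foldl (fun ret j =>
        if (PySem.List.slice part1 (some j) none).sum == (PySem.List.slice part1 none (some j)).sum then
          (PySem.List.pyRange 0 (part2.length : Int) 1).foldl (fun ret k =>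
            if (PySem.List.slice part2 (some k) none).sum == (PySem.List.slice part2 none (some k)).sum then
              true
            else ret) ret
        else ret) ret
    else ret) false

-- ===== PORT B =====
def isPartitionable_alt (nums : List Int) : Bool :=
  let n : Int := (nums.length : Int)
  let Ps := nums.foldl (fun (ps : List Int × Int) x =>
      let s := ps.2 + x
      (ps.1 ++ [s], s)) ([0], 0)
  let P := Ps.1
  let T := Ps.2
  let mk := (PySem.List.pyRange 0 n 1).foldl (fun (mm : Int × Int) idx =>
      let maxM := if 4 * PySem.List.pyGetD P idx 0 == 3 * T && idx > mm.1 then idx else mm.1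
      let minK := if 4 * PySem.List.pyGetD P idx 0 == T && idx < mm.2 then idx else mm.2
      (maxM, minK)) (-1, n)
  (PySem.List.pyRange 1 n 1).any (fun i =>
      2 * PySem.List.pyGetD P i 0 == T && decide (mk.2 < i) && decide (i ≤ mk.1))

-- ===== PRECONDITION & SPEC =====
def Spec_isPartitionable (nums : List Int) (out : Bool) : Prop := out = isPartitionable_alt nums
instance (nums : List Int) (out : Bool) : Decidable (Spec_isPartitionable nums out) := by unfold Spec_isPartitionable; infer_instance

-- ===== CLAIM (what is proved, stated in full; the proofs are below) =====
def Claim_equal_isPartitionable : Prop := ∀ (nums : List Int), Dom_isPartitionable nums → Spec_isPartitionable nums (isPartitionable nums)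

-- ===== LEMMAS AND PROOFS =====

-- prefix sum of the first a elements
def pvPref (l : List Int) (a : Nat) : Int := (l.take a).sum
theorem pvPref_sum_drop (l : List Int) (a : Nat) : (l.drop a).sum = l.sum - pvPref l a := by
  have h := List.sum_take_add_sum_drop l a; unfold pvPref; linarith
theorem pvPref_drop (l : List Int) (a b : Nat) :
    pvPref (l.drop a) b = pvPref l (a + b) - pvPref l a := by
  unfold pvPref
  have h : (l.drop a).take b = (l.take (a + b)).drop a := by
    rw [List.drop_take]; congr 1; omega
  rw [h, pvPref_sum_drop (l.take (a+b)) a]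
  unfold pvPref; rw [List.take_take]
  have : min a (a+b) = a := by omega
  rw [this]
theorem pvPref_take (l : List Int) (a b : Nat) (h : b ≤ a) :
    pvPref (l.take a) b = pvPref l b := by
  unfold pvPref; rw [List.take_take]
  have : min b a = b := by omega
  rw [this]

theorem pv_foldl_or_any {A : Type} (l : List A) (step : Bool → A → Bool) (g : A → Bool)
    (h : ∀ r a, step r a = (r || g a)) (init : Bool) :
    l.foldl step init = (init || l.any g) := by
  induction l generalizing init with
  | nil => simp
  | cons x t ih => simp [List.foldl_cons, h, ih, Bool.or_assoc]
theorem pv_any_and_const {A : Type} (l : List A) (f : A → Bool) (c : Bool) :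
    (l.any (fun x => f x && c)) = (l.any f && c) := by
  cases c <;> simp

theorem A_any (nums : List Int) : isPartitionable nums =
    (PySem.List.pyRange 0 (nums.length : Int) 1).any (fun i =>
      ((PySem.List.slice nums (some i) none).sum == (PySem.List.slice nums none (some i)).sum) &&
      ((PySem.List.pyRange 0 ((PySem.List.slice nums (some i) none).length : Int) 1).any (fun j =>
        (PySem.List.slice (PySem.List.slice nums (some i) none) (some j) none).sum ==
          (PySem.List.slice (PySem.List.slice nums (some i) none) none (some j)).sum) &&
       (PySem.List.pyRange 0 ((PySem.List.slice nums none (some i)).length : Int) 1).any (fun k =>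
        (PySem.List.slice (PySem.List.slice nums none (some i)) (some k) none).sum ==
          (PySem.List.slice (PySem.List.slice nums none (some i)) none (some k)).sum))) := by
  unfold isPartitionable
  have hK : ∀ (part : List Int) (r : Bool),
      (PySem.List.pyRange 0 (part.length : Int) 1).foldl (fun ret k =>
        if (PySem.List.slice part (some k) none).sum == (PySem.List.slice part none (some k)).sum then true else ret) r
      = (r || (PySem.List.pyRange 0 (part.length : Int) 1).any (fun k =>
          (PySem.List.slice part (some k) none).sum == (PySem.List.slice part none (some k)).sum)) := by
    intro part r
    refine pv_foldl_or_any _ _ _ (fun r k => ?_) r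
    by_cases h : ((PySem.List.slice part (some k) none).sum == (PySem.List.slice part none (some k)).sum) = true
    · rw [if_pos h, h]; simp
    · rw [if_neg h]
      have hf : ((PySem.List.slice part (some k) none).sum == (PySem.List.slice part none (some k)).sum) = false :=
        Bool.eq_false_iff.mpr h
      rw [hf]; simp
  have hJ : ∀ (part1 part2 : List Int) (r : Bool),
      (PySem.List.pyRange 0 (part1.length : Int) 1).foldl (fun ret j =>
        if (PySem.List.slice part1 (some j) none).sum == (PySem.List.slice part1 none (some j)).sum then
          (PySem.List.pyRange 0 (part2.length : Int) 1).foldl (fun ret k =>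
            if (PySem.List.slice part2 (some k) none).sum == (PySem.List.slice part2 none (some k)).sum then true else ret) ret
        else ret) r
      = (r || ((PySem.List.pyRange 0 (part1.length : Int) 1).any (fun j =>
            (PySem.List.slice part1 (some j) none).sum == (PySem.List.slice part1 none (some j)).sum) &&
          (PySem.List.pyRange 0 (part2.length : Int) 1).any (fun k =>
            (PySem.List.slice part2 (some k) none).sum == (PySem.List.slice part2 none (some k)).sum))) := by
    intro part1 part2 r
    rw [pv_foldl_or_any _ _
      (fun j => ((PySem.List.slice part1 (some j) none).sum == (PySem.List.slice part1 none (some j)).sum) &&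
          (PySem.List.pyRange 0 (part2.length : Int) 1).any (fun k =>
            (PySem.List.slice part2 (some k) none).sum == (PySem.List.slice part2 none (some k)).sum))
      (fun r j => ?_) r, pv_any_and_const]
    by_cases h : ((PySem.List.slice part1 (some j) none).sum == (PySem.List.slice part1 none (some j)).sum) = true
    · rw [if_pos h, hK part2 r]; simp [h]
    · rw [if_neg h]
      have hf : ((PySem.List.slice part1 (some j) none).sum == (PySem.List.slice part1 none (some j)).sum) = false :=
        Bool.eq_false_iff.mpr h
      simp [hf]
  rw [pv_foldl_or_any _ _
    (fun i =>
      ((PySem.List.slice nums (some i) none).sum == (PySem.List.slice nums none (some i)).sum) &&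
      ((PySem.List.pyRange 0 ((PySem.List.slice nums (some i) none).length : Int) 1).any (fun j =>
        (PySem.List.slice (PySem.List.slice nums (some i) none) (some j) none).sum ==
          (PySem.List.slice (PySem.List.slice nums (some i) none) none (some j)).sum) &&
       (PySem.List.pyRange 0 ((PySem.List.slice nums none (some i)).length : Int) 1).any (fun k =>
        (PySem.List.slice (PySem.List.slice nums none (some i)) (some k) none).sum ==
          (PySem.List.slice (PySem.List.slice nums none (some i)) none (some k)).sum)))
    (fun r i => ?_) false, Bool.false_or]
  by_cases h : ((PySem.List.slice nums (some i) none).sum == (PySem.List.slice nums none (some i)).sum) = true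
  · rw [if_pos h, hJ]; simp [h]
  · rw [if_neg h]
    have hf := Bool.eq_false_iff.mpr h
    simp [hf]

theorem c1_iff (nums : List Int) (i : Int) (h0 : 0 ≤ i) :
    (PySem.List.slice nums (some i) none).sum = (PySem.List.slice nums none (some i)).sum ↔
      2 * pvPref nums i.toNat = nums.sum := by
  rw [PySem.List.slice_from nums h0, PySem.List.slice_to nums h0, pvPref_sum_drop,
    show (nums.take i.toNat).sum = pvPref nums i.toNat from rfl]
  omega

theorem J_iff (nums : List Int) (i : Int) (h0 : 0 ≤ i) (h1 : i < (nums.length : Int)) :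
    (∃ j : Int, (0 ≤ j ∧ j < ((PySem.List.slice nums (some i) none).length : Int)) ∧
        (PySem.List.slice (PySem.List.slice nums (some i) none) (some j) none).sum =
          (PySem.List.slice (PySem.List.slice nums (some i) none) none (some j)).sum) ↔
      (∃ m : Int, i ≤ m ∧ m < (nums.length : Int) ∧
        2 * pvPref nums m.toNat = nums.sum + pvPref nums i.toNat) := by
  rw [PySem.List.slice_from nums h0]
  constructor
  · rintro ⟨j, ⟨hj0, hjlen⟩, hcond⟩
    rw [PySem.List.slice_from _ hj0, PySem.List.slice_to _ hj0, pvPref_sum_drop,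
      pvPref_sum_drop nums, pvPref_drop,
      show (List.take j.toNat (List.drop i.toNat nums)).sum = pvPref (nums.drop i.toNat) j.toNat from rfl,
      pvPref_drop] at hcond
    refine ⟨i + j, by omega, ?_, ?_⟩
    · rw [List.length_drop] at hjlen; omega
    · have hij : (i + j).toNat = i.toNat + j.toNat := by omega
      rw [hij]; omega
  · rintro ⟨m, hm0, hm1, hcond⟩
    refine ⟨m - i, ⟨by omega, ?_⟩, ?_⟩
    · rw [List.length_drop]; omega
    · rw [PySem.List.slice_from _ (by omega : (0:Int) ≤ m - i),
        PySem.List.slice_to _ (by omega : (0:Int) ≤ m - i), pvPref_sum_drop,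
        pvPref_sum_drop nums, pvPref_drop,
        show (List.take (m - i).toNat (List.drop i.toNat nums)).sum = pvPref (nums.drop i.toNat) (m - i).toNat from rfl,
        pvPref_drop]
      have hmi : i.toNat + (m - i).toNat = m.toNat := by omega
      rw [hmi]; omega

theorem K_iff (nums : List Int) (i : Int) (h0 : 0 ≤ i) (h1 : i < (nums.length : Int)) :
    (∃ k : Int, (0 ≤ k ∧ k < ((PySem.List.slice nums none (some i)).length : Int)) ∧
        (PySem.List.slice (PySem.List.slice nums none (some i)) (some k) none).sum =
          (PySem.List.slice (PySem.List.slice nums none (some i)) none (some k)).sum) ↔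
      (∃ k : Int, 0 ≤ k ∧ k < i ∧ 2 * pvPref nums k.toNat = pvPref nums i.toNat) := by
  rw [PySem.List.slice_to nums h0]
  have hlen : ((nums.take i.toNat).length : Int) = i := by
    rw [List.length_take]; omega
  constructor
  · rintro ⟨k, ⟨hk0, hklen⟩, hcond⟩
    rw [PySem.List.slice_from _ hk0, PySem.List.slice_to _ hk0, pvPref_sum_drop,
      show ((nums.take i.toNat).take k.toNat).sum = pvPref (nums.take i.toNat) k.toNat from rfl,
      show (nums.take i.toNat).sum = pvPref nums i.toNat from rfl,
      pvPref_take nums i.toNat k.toNat (by omega)] at hcond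
    exact ⟨k, hk0, by omega, by omega⟩
  · rintro ⟨k, hk0, hk1, hcond⟩
    refine ⟨k, ⟨hk0, by omega⟩, ?_⟩
    rw [PySem.List.slice_from _ hk0, PySem.List.slice_to _ hk0, pvPref_sum_drop,
      show ((nums.take i.toNat).take k.toNat).sum = pvPref (nums.take i.toNat) k.toNat from rfl,
      show (nums.take i.toNat).sum = pvPref nums i.toNat from rfl,
      pvPref_take nums i.toNat k.toNat (by omega)]
    omega

theorem A_char (nums : List Int) : isPartitionable nums = true ↔
    ∃ i : Int, (0 ≤ i ∧ i < (nums.length : Int)) ∧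
      2 * pvPref nums i.toNat = nums.sum ∧
      (∃ m : Int, i ≤ m ∧ m < (nums.length : Int) ∧
        2 * pvPref nums m.toNat = nums.sum + pvPref nums i.toNat) ∧
      (∃ k : Int, 0 ≤ k ∧ k < i ∧ 2 * pvPref nums k.toNat = pvPref nums i.toNat) := by
  rw [A_any, List.any_eq_true]
  constructor
  · rintro ⟨i, hmem, hb⟩
    rw [PySem.List.mem_pyRange_one] at hmem
    obtain ⟨h0, h1⟩ := hmem
    simp only [Bool.and_eq_true, beq_iff_eq, List.any_eq_true, PySem.List.mem_pyRange_one] at hb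
    obtain ⟨hc1, hJ, hK⟩ := hb
    exact ⟨i, ⟨h0, h1⟩, (c1_iff nums i h0).mp hc1, (J_iff nums i h0 h1).mp hJ,
      (K_iff nums i h0 h1).mp hK⟩
  · rintro ⟨i, ⟨h0, h1⟩, hc1, hJ, hK⟩
    refine ⟨i, PySem.List.mem_pyRange_one.mpr ⟨h0, h1⟩, ?_⟩
    simp only [Bool.and_eq_true, beq_iff_eq, List.any_eq_true, PySem.List.mem_pyRange_one]
    exact ⟨(c1_iff nums i h0).mpr hc1, (J_iff nums i h0 h1).mpr hJ, (K_iff nums i h0 h1).mpr hK⟩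

theorem buildP (l : List Int) (acc : List Int) (s : Int) :
    l.foldl (fun (ps : List Int × Int) x => (ps.1 ++ [ps.2 + x], ps.2 + x)) (acc, s)
      = (acc ++ (List.range l.length).map (fun j => s + pvPref l (j+1)), s + l.sum) := by
  induction l generalizing acc s with
  | nil => simp [pvPref]
  | cons x t ih =>
    simp only [List.foldl_cons, ih, List.length_cons, List.sum_cons, List.range_succ_eq_map]
    refine Prod.ext ?_ (by simp; ring)
    simp only [List.map_cons, List.map_map]
    simp [pvPref, List.take_succ_cons, List.append_assoc]
    intro a _
    ring
theorem P_get (nums : List Int) (idx : Int) (h0 : 0 ≤ idx) (h1 : idx ≤ (nums.length : Int)) :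
    PySem.List.pyGetD ((0 : Int) :: (List.range nums.length).map (fun j => pvPref nums (j+1))) idx 0
      = pvPref nums idx.toNat := by
  have hcast : idx = ((idx.toNat : Nat) : Int) := by omega
  rw [hcast, PySem.List.pyGetD_natCast]
  cases h : idx.toNat with
  | zero => simp [pvPref]
  | succ j =>
    have hj : j < nums.length := by omega
    rw [List.getD_cons_succ, PySem.List.getD_map_range _ _ _ _ hj]
    simp
theorem fold_max_iff (Q : Int → Prop) [DecidablePred Q] (l : List Int) (m0 : Int) (i : Int) :
    i ≤ l.foldl (fun m idx => if Q idx ∧ idx > m then idx else m) m0 ↔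
      (i ≤ m0 ∨ ∃ x ∈ l, Q x ∧ i ≤ x) := by
  induction l generalizing m0 with
  | nil => simp
  | cons x t ih =>
    simp only [List.foldl_cons, ih, List.mem_cons]
    constructor
    · rintro (h | ⟨y, hy, hqy, hiy⟩)
      · split_ifs at h with hc
        · exact Or.inr ⟨x, Or.inl rfl, hc.1, h⟩
        · exact Or.inl h
      · exact Or.inr ⟨y, Or.inr hy, hqy, hiy⟩
    · rintro (h | ⟨y, (rfl | hy), hqy, hiy⟩)
      · left; split_ifs with hc
        · obtain ⟨_, hgt⟩ := hc; omega
        · exact h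
      · left; split_ifs with hc
        · omega
        · simp [hqy] at hc; omega
      · exact Or.inr ⟨y, hy, hqy, hiy⟩
theorem fold_min_iff (R : Int → Prop) [DecidablePred R] (l : List Int) (m0 : Int) (i : Int) :
    l.foldl (fun m idx => if R idx ∧ idx < m then idx else m) m0 < i ↔
      (m0 < i ∨ ∃ x ∈ l, R x ∧ x < i) := by
  induction l generalizing m0 with
  | nil => simp
  | cons x t ih =>
    simp only [List.foldl_cons, ih, List.mem_cons]
    constructor
    · rintro (h | ⟨y, hy, hqy, hiy⟩)
      · split_ifs at h with hc
        · exact Or.inr ⟨x, Or.inl rfl, hc.1, h⟩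
        · exact Or.inl h
      · exact Or.inr ⟨y, Or.inr hy, hqy, hiy⟩
    · rintro (h | ⟨y, (rfl | hy), hqy, hiy⟩)
      · left; split_ifs with hc
        · obtain ⟨_, hgt⟩ := hc; omega
        · exact h
      · left; split_ifs with hc
        · omega
        · simp [hqy] at hc; omega
      · exact Or.inr ⟨y, hy, hqy, hiy⟩

theorem B_char (nums : List Int) : isPartitionable_alt nums = true ↔
    ∃ i : Int, (1 ≤ i ∧ i < (nums.length : Int)) ∧
      2 * pvPref nums i.toNat = nums.sum ∧
      (∃ k : Int, 0 ≤ k ∧ k < (nums.length : Int) ∧ 4 * pvPref nums k.toNat = nums.sum ∧ k < i) ∧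
      (∃ m : Int, 0 ≤ m ∧ m < (nums.length : Int) ∧ 4 * pvPref nums m.toNat = 3 * nums.sum ∧ i ≤ m) := by
  simp only [isPartitionable_alt]
  rw [buildP, PySem.List.foldl_prod_mk (fun m idx => if 4 * PySem.List.pyGetD (([0] ++ (List.range nums.length).map (fun j => 0 + pvPref nums (j+1))) : List Int) idx 0 == 3 * (0 + nums.sum) && idx > m then idx else m) (fun m idx => if 4 * PySem.List.pyGetD (([0] ++ (List.range nums.length).map (fun j => 0 + pvPref nums (j+1))) : List Int) idx 0 == (0 + nums.sum) && idx < m then idx else m)]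
  simp only [List.singleton_append, zero_add]
  rw [List.any_eq_true]
  constructor
  · rintro ⟨i, hmem, hb⟩
    rw [PySem.List.mem_pyRange_one] at hmem
    obtain ⟨hi1, hin⟩ := hmem
    simp only [Bool.and_eq_true, beq_iff_eq, decide_eq_true_eq] at hb
    obtain ⟨⟨hpi, hmin⟩, hmax⟩ := hb
    rw [P_get nums i (by omega) (by omega)] at hpi
    rw [fold_max_iff] at hmax
    rw [fold_min_iff] at hmin
    refine ⟨i, ⟨hi1, hin⟩, hpi, ?_, ?_⟩
    · rcases hmin with h | ⟨k, hk, hqk, hki⟩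
      · omega
      · rw [PySem.List.mem_pyRange_one] at hk
        rw [P_get nums k (by omega) (by omega)] at hqk
        exact ⟨k, hk.1, hk.2, hqk, hki⟩
    · rcases hmax with h | ⟨m, hm, hqm, him⟩
      · omega
      · rw [PySem.List.mem_pyRange_one] at hm
        rw [P_get nums m (by omega) (by omega)] at hqm
        exact ⟨m, hm.1, hm.2, hqm, him⟩
  · rintro ⟨i, ⟨hi1, hin⟩, hpi, ⟨k, hk0, hkn, hqk, hki⟩, ⟨m, hm0, hmn, hqm, him⟩⟩
    refine ⟨i, PySem.List.mem_pyRange_one.mpr ⟨hi1, hin⟩, ?_⟩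
    simp only [Bool.and_eq_true, beq_iff_eq, decide_eq_true_eq]
    rw [P_get nums i (by omega) (by omega), fold_max_iff, fold_min_iff]
    refine ⟨⟨hpi, Or.inr ⟨k, PySem.List.mem_pyRange_one.mpr ⟨hk0, hkn⟩, ?_, hki⟩⟩,
      Or.inr ⟨m, PySem.List.mem_pyRange_one.mpr ⟨hm0, hmn⟩, ?_, him⟩⟩
    · rw [P_get nums k (by omega) (by omega)]
      exact hqk
    · rw [P_get nums m (by omega) (by omega)]
      exact hqm

theorem isPartitionable_eq_alt (nums : List Int) : isPartitionable nums = isPartitionable_alt nums := by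
  have h : (isPartitionable nums = true) ↔ (isPartitionable_alt nums = true) := by
    rw [A_char, B_char]
    constructor
    · rintro ⟨i, ⟨h0, h1⟩, hc1, ⟨m, hm1, hm2, hm3⟩, ⟨k, hk1, hk2, hk3⟩⟩
      exact ⟨i, ⟨by omega, h1⟩, hc1, ⟨k, hk1, by omega, by omega, hk2⟩,
        ⟨m, by omega, hm2, by omega, hm1⟩⟩
    · rintro ⟨i, ⟨hi1, hin⟩, hc1, ⟨k, hk0, hkn, hk4, hki⟩, ⟨m, hm0, hmn, hm4, him⟩⟩
      exact ⟨i, ⟨by omega, hin⟩, hc1, ⟨m, him, hmn, by omega⟩, ⟨k, hk0, hki, by omega⟩⟩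
  cases hA : isPartitionable nums <;> cases hB : isPartitionable_alt nums <;> simp_all

-- ===== VERDICT (by name: the statement is the Claim_ definition above) =====
theorem isPartitionable_spec : Claim_equal_isPartitionable := by
  intro nums _
  unfold Spec_isPartitionable
  exact isPartitionable_eq_alt nums
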